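-- pv_equiv track=rewrite | github.com/bhroarsns/refer-webext | library/mklib.py | publishedDate
-- ===== SOURCE A (Python) =====
-- def publishedDate(data):
--     candidates = []
--     propertyNames = ["published", "published-online", "published-print", "issued", "created", "deposited"]
--     for propertyName in propertyNames:
--         if propertyName in data:
--             if "date-parts" in data[propertyName]:
--                 if not data[propertyName]["date-parts"][0] is None:
--                     candidates.append(data[propertyName]["date-parts"][0])
--     if len(candidates) == 0:
--         return []
--     else:
--         candidates.sort(key=toJoined)
--         for _ in range(3-len(candidates[0])):
--             candidates[0].append(1)
--         return candidates[0]
--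
-- def toJoined(arr):
--     value = ""
--     for i in range(len(arr)):
--         if not arr[i] is None:
--             value += "0" + str(arr[i]) if arr[i] < 10 else str(arr[i])
--     return value
-- ===== SOURCE B (Python) =====
-- PROPERTY_NAMES = ["published", "published-online", "published-print", "issued", "created", "deposited"]
--
--
-- def _candidate(data, name):
--     entry = data.get(name)
--     if entry is None:
--         return None
--     dps = entry.get("date-parts")
--     if dps is None:
--         return None
--     return dps[0]
--
--
-- def _key(arr):
--     return "".join(("0" + str(x)) if x < 10 else str(x) for x in arr if x is not None)
--
--
-- def publishedDate(data):
--     best = None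
--     bestKey = None
--     for name in PROPERTY_NAMES:
--         cand = _candidate(data, name)
--         if cand is None:
--             continue
--         k = _key(cand)
--         if best is None or k < bestKey:
--             best, bestKey = cand, k
--     return [] if best is None else best + [1] * (3 - len(best))
-- ===== Notes on version B (the rewrite author's own statement) =====
-- stated objective: alternative
-- what changed: Replaces the build-a-list-then-stable-sort pass by a single running-minimum scan over the property names that keeps one best candidate and its string key (strict less-than so the first of equal keys wins), then pads the winner with 1s; no intermediate list and no sort. A pads the winning list in place (mutating the caller's data); B is pure, so equivalence is about the return value only.
import Mathlib
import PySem

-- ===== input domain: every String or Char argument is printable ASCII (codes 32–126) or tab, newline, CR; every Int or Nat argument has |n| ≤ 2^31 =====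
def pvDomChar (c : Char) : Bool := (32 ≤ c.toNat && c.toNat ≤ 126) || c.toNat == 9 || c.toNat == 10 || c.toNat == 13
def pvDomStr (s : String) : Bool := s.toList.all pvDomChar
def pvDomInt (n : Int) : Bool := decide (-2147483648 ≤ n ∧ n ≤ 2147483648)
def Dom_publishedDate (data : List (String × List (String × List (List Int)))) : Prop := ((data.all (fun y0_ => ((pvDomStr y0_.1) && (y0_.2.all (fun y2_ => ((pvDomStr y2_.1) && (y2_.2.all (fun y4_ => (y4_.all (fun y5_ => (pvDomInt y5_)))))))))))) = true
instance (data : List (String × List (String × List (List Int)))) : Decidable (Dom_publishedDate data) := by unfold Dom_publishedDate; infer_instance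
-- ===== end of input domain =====

-- B replaces build-list-then-stable-sort by one running-minimum pass keeping a single best
-- candidate and its key (objective: alternative, no sort, no intermediate list).
-- A pads candidates[0] IN PLACE, mutating the caller's data; B is pure: the equivalence
-- proved here is about the RETURN value only.

-- ===== PORT A =====
def pvNames : List String :=
  ["published", "published-online", "published-print", "issued", "created", "deposited"]

-- toJoined(arr): arr holds Ints (never None under the type convention), so the 'is None'
-- guard never fires and the index loop is the fold over the elements.
def toJoined (arr : List Int) : String :=
  arr.foldl (fun v a => v ++ (if a < 10 then "0" ++ PySem.Int.toStr a else PySem.Int.toStr a)) ""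

def publishedDate (data : List (String × List (String × List (List Int)))) : List Int :=
  let candidates := pvNames.foldl (fun (acc : List (List Int)) name =>
    match PySem.Dict.get? ⟨data⟩ name with
    | none => acc
    | some entry =>
      match PySem.Dict.get? ⟨entry⟩ "date-parts" with
      | none => acc
      | some dps =>
        match PySem.List.pyGet? dps 0 with
        | none => acc          -- IndexError in Python (empty date-parts); excluded by Pre_
        | some c => acc ++ [c]) []
  match PySem.List.sorted candidates toJoined false with
  | [] => []                   -- len(candidates) == 0
  | m :: _ => (PySem.List.pyRange 0 (3 - (m.length : Int)) 1).foldl (fun c _ => c ++ [(1 : Int)]) m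

-- ===== PORT B =====
def candB (data : List (String × List (String × List (List Int)))) (name : String) :
    Option (List Int) :=
  match PySem.Dict.get? ⟨data⟩ name with
  | none => none
  | some entry =>
    match PySem.Dict.get? ⟨entry⟩ "date-parts" with
    | none => none
    | some dps => PySem.List.pyGet? dps 0  -- none = IndexError (empty date-parts); excluded by Pre_

def keyB (arr : List Int) : String :=
  String.join (arr.map (fun x => if x < 10 then "0" ++ PySem.Int.toStr x else PySem.Int.toStr x))

def publishedDate_alt (data : List (String × List (String × List (List Int)))) : List Int :=
  let best := pvNames.foldl (fun (b : Option (List Int × String)) name =>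
    match candB data name with
    | none => b
    | some c =>
      let k := keyB c
      match b with
      | none => some (c, k)
      | some (_, bk) => if k < bk then some (c, k) else b) none
  match best with
  | none => []
  | some (c, _) => c ++ List.replicate (3 - c.length) (1 : Int)

-- ===== PRECONDITION & SPEC =====
-- Pre_ excludes exactly the inputs on which A raises IndexError: a present property whose
-- "date-parts" value is the empty list (data[name]["date-parts"][0] is out of range).
def Pre_publishedDate (data : List (String × List (String × List (List Int)))) : Prop :=
  (pvNames.all (fun name =>
    match PySem.Dict.get? ⟨data⟩ name with
    | none => true
    | some entry =>
      match PySem.Dict.get? ⟨entry⟩ "date-parts" with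
      | none => true
      | some dps => decide (dps ≠ []))) = true
instance (data : List (String × List (String × List (List Int)))) : Decidable (Pre_publishedDate data) := by unfold Pre_publishedDate; infer_instance

def pvWitness_publishedDate : (List (String × List (String × List (List Int)))) :=
  [("published", [("date-parts", [[2020, 1, 2]])]), ("issued", [("date-parts", [[2019, 12]])])]

def Spec_publishedDate (data : List (String × List (String × List (List Int)))) (out : List Int) : Prop := out = publishedDate_alt data
instance (data : List (String × List (String × List (List Int)))) (out : List Int) : Decidable (Spec_publishedDate data out) := by unfold Spec_publishedDate; infer_instance

-- ===== CLAIM (what is proved, stated in full; the proofs are below) =====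
def Claim_equal_publishedDate : Prop := ∀ (data : List (String × List (String × List (List Int)))), Dom_publishedDate data → Pre_publishedDate data → Spec_publishedDate data (publishedDate data)

-- ===== LEMMAS AND PROOFS =====

theorem key_eq (arr : List Int) : toJoined arr = keyB arr := by
  unfold toJoined keyB String.join
  rw [List.foldl_map]

-- running-minimum step on optional best
def pick (o : Option (List Int)) (c : List Int) : Option (List Int) :=
  match o with
  | none => some c
  | some m => if keyB c < keyB m then some c else some m

-- head of an insertBy step
theorem insertBy_head (x : List Int) (acc : List (List Int)) :
    (PySem.List.insertBy (fun a b => decide (toJoined a < toJoined b)) x acc).head? =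
      some (match acc.head? with
            | none => x
            | some y => if toJoined x < toJoined y then x else y) := by
  cases acc with
  | nil => rfl
  | cons y ys =>
    simp only [PySem.List.insertBy, List.head?_cons]
    by_cases h : toJoined x < toJoined y <;> simp [h]

theorem foldl_insertBy_head (xs : List (List Int)) (acc : List (List Int)) :
    ((xs.foldl (fun acc x => PySem.List.insertBy (fun a b => decide (toJoined a < toJoined b)) x acc) acc).head?) =
      xs.foldl pick acc.head? := by
  induction xs generalizing acc with
  | nil => rfl
  | cons x t ih =>
    simp only [List.foldl_cons]
    rw [ih, insertBy_head]
    congr 1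
    cases acc.head? with
    | none => simp [pick]
    | some y =>
      simp only [pick, key_eq]
      split <;> simp

theorem sorted_head (cs : List (List Int)) :
    (PySem.List.sorted cs toJoined false).head? = cs.foldl pick none := by
  rw [PySem.List.sorted_eq_foldl_insertBy]
  exact foldl_insertBy_head cs []

-- A's candidate-collecting fold is append-of-filterMap over candB
theorem foldlA_eq (data : List (String × List (String × List (List Int)))) (l : List String)
    (acc : List (List Int)) :
    (l.foldl (fun (acc : List (List Int)) name =>
      match PySem.Dict.get? ⟨data⟩ name with
      | none => acc
      | some entry =>
        match PySem.Dict.get? ⟨entry⟩ "date-parts" with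
        | none => acc
        | some dps =>
          match PySem.List.pyGet? dps 0 with
          | none => acc
          | some c => acc ++ [c]) acc) = acc ++ l.filterMap (candB data) := by
  induction l generalizing acc with
  | nil => simp
  | cons name t ih =>
    simp only [List.foldl_cons, List.filterMap_cons]
    unfold candB
    cases h1 : PySem.Dict.get? ⟨data⟩ name with
    | none => simp only [h1]; simpa using ih acc
    | some entry =>
      cases h2 : PySem.Dict.get? ⟨entry⟩ "date-parts" with
      | none => simp only [h1, h2]; simpa using ih acc
      | some dps =>
        cases h3 : PySem.List.pyGet? dps 0 with
        | none => simp only [h1, h2, h3]; simpa using ih acc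
        | some c => simp only [h1, h2, h3]; simpa using ih (acc ++ [c])

-- B's fold is the pick-fold over the same candidates, pairing the best with its key
theorem foldlB_eq (data : List (String × List (String × List (List Int)))) (l : List String)
    (o : Option (List Int)) :
    (l.foldl (fun (b : Option (List Int × String)) name =>
      match candB data name with
      | none => b
      | some c =>
        let k := keyB c
        match b with
        | none => some (c, k)
        | some (_, bk) => if k < bk then some (c, k) else b) (o.map (fun m => (m, keyB m)))) =
      ((l.filterMap (candB data)).foldl pick o).map (fun m => (m, keyB m)) := by
  induction l generalizing o with
  | nil => rfl
  | cons name t ih =>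
    simp only [List.foldl_cons, List.filterMap_cons]
    cases h : candB data name with
    | none => simpa using ih o
    | some c =>
      simp only [List.foldl_cons]
      cases o with
      | none => simpa using ih (some c)
      | some m =>
        simp only [Option.map_some, pick]
        by_cases hk : keyB c < keyB m
        · rw [if_pos hk, if_pos hk]
          simpa using ih (some c)
        · rw [if_neg hk, if_neg hk]
          simpa using ih (some m)

-- padding: A's range loop equals B's replicate
theorem foldl_pad (r : List Int) (c : List Int) :
    r.foldl (fun c _ => c ++ [(1 : Int)]) c = c ++ List.replicate r.length (1 : Int) := by
  induction r generalizing c with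
  | nil => simp
  | cons a t ih =>
    simp only [List.foldl_cons, List.length_cons, ih]
    simp [List.replicate_succ]

theorem pyRange_pad_len (n : Nat) :
    (PySem.List.pyRange 0 (3 - (n : Int)) 1).length = 3 - n := by
  simp [PySem.List.pyRange]
  omega

-- ===== VERDICT (by name: the statement is the Claim_ definition above) =====
theorem publishedDate_spec : Claim_equal_publishedDate := by
  intro data _ _
  unfold Spec_publishedDate publishedDate publishedDate_alt
  rw [foldlA_eq data pvNames []]
  rw [show (none : Option (List Int × String)) = (Option.map (fun m => (m, keyB m)) none) from rfl,
      foldlB_eq data pvNames none]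
  simp only [List.nil_append]
  have hh := sorted_head (pvNames.filterMap (candB data))
  cases hs : PySem.List.sorted (pvNames.filterMap (candB data)) toJoined false with
  | nil =>
    rw [hs] at hh
    simp only [List.head?_nil] at hh
    rw [← hh]
    rfl
  | cons m t =>
    rw [hs] at hh
    simp only [List.head?_cons] at hh
    rw [← hh]
    simp only [Option.map_some]
    rw [foldl_pad, pyRange_pad_len]
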